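-- pv_equiv track=rewrite | github.com/TheDataStation/solo | preprocess/untag_triples_test.py | check_less_than_two
-- ===== SOURCE A (Python) =====
-- def check_less_than_two(passage, tag):
--     count = 0
--     start = 0
--     offset = passage.find(tag, start)
--     while offset >= 0:
--         count += 1
--         start = offset + 1
--         offset = passage.find(tag, start)
--     if tag != '[T]' and count >= 2:
--         return False
--     return True
-- ===== SOURCE B (Python) =====
-- def check_less_than_two(passage, tag):
--     if tag == '[T]':
--         return True
--     first = passage.find(tag)
--     return first < 0 or passage.find(tag, first + 1) < 0
-- ===== Notes on version B (the rewrite author's own statement) =====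
-- stated objective: simpler
-- what changed: Replaces A's while loop that counts every overlapping occurrence with a loop-free existence test: locate the first occurrence and then check whether any second occurrence exists after it, returning immediately.
import Mathlib
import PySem

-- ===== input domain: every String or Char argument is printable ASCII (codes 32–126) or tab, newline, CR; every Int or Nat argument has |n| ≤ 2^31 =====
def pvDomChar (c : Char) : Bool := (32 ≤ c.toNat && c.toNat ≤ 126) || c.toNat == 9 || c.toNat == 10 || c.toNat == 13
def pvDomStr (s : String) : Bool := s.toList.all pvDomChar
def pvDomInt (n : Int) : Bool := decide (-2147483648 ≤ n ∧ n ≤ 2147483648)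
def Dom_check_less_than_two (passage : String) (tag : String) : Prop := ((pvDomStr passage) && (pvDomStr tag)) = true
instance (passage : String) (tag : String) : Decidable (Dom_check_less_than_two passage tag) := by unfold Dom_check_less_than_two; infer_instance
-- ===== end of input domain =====

-- B replaces A's occurrence-counting while loop with a loop-free existence test:
-- find the first occurrence, then check whether a second one exists after it (objective: simpler).


-- ===== PORT A =====
-- A's while loop: offset = passage.find(tag, start); while offset >= 0: count += 1; start = offset + 1.
-- fuel is a totality guard only: each successful find strictly increases start while staying ≤ len(s),
-- so the loop makes at most len(s) + 2 calls to find; fuel = len(s) + 2 is never exhausted.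
def cltLoopA : Nat → List Char → List Char → Int → Nat → Nat
  | 0, _, _, _, count => count
  | fuel + 1, s, tag, start, count =>
    let offset := PySem.Chars.findFrom s tag start none
    if 0 ≤ offset then cltLoopA fuel s tag (offset + 1) (count + 1) else count

def check_less_than_two (passage : String) (tag : String) : Bool :=
  let count := cltLoopA (passage.toList.length + 2) passage.toList tag.toList 0 0
  if tag ≠ "[T]" ∧ 2 ≤ count then false else true

-- ===== PORT B =====
-- Source B: first = passage.find(tag); return first < 0 or passage.find(tag, first + 1) < 0
def check_less_than_two_alt (passage : String) (tag : String) : Bool :=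
  if tag = "[T]" then true
  else
    let first := PySem.Str.findFrom passage tag 0 none
    decide (first < 0) || decide (PySem.Str.findFrom passage tag (first + 1) none < 0)

-- ===== PRECONDITION & SPEC =====
def Spec_check_less_than_two (passage : String) (tag : String) (out : Bool) : Prop := out = check_less_than_two_alt passage tag
instance (passage : String) (tag : String) (out : Bool) : Decidable (Spec_check_less_than_two passage tag out) := by unfold Spec_check_less_than_two; infer_instance

-- ===== CLAIM =====
def Claim_equal_check_less_than_two : Prop := ∀ (passage : String) (tag : String), Dom_check_less_than_two passage tag → Spec_check_less_than_two passage tag (check_less_than_two passage tag)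

-- ===== LEMMAS AND PROOFS =====

-- the loop's accumulator never decreases
theorem le_cltLoopA (fuel : Nat) (s tag : List Char) (start : Int) (count : Nat) :
    count ≤ cltLoopA fuel s tag start count := by
  induction fuel generalizing start count with
  | zero => exact le_refl _
  | succ fuel ih =>
    simp only [cltLoopA]
    split
    · have := ih (PySem.Chars.findFrom s tag start none + 1) (count + 1)
      omega
    · exact le_refl _

-- ===== VERDICT =====
theorem check_less_than_two_spec : Claim_equal_check_less_than_two := by
  intro passage tag _
  unfold Spec_check_less_than_two check_less_than_two check_less_than_two_alt
  simp only [PySem.Str.findFrom_eq]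
  by_cases ht : tag = "[T]"
  · simp [ht]
  · rw [if_neg ht]
    set s := passage.toList
    set t := tag.toList
    show (if tag ≠ "[T]" ∧ 2 ≤ cltLoopA (s.length + 1 + 1) s t 0 0 then false else true) = _
    simp only [cltLoopA, PySem.Chars.findFrom_zero]
    set f0 := PySem.Chars.find s t with hf0
    by_cases h0 : (0 : Int) ≤ f0
    · rw [if_pos h0]
      set f1 := PySem.Chars.findFrom s t (f0 + 1) none with hf1
      by_cases h1 : (0 : Int) ≤ f1
      · rw [if_pos h1]
        have hge := le_cltLoopA s.length s t (f1 + 1) (0 + 1 + 1)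
        rw [if_pos ⟨ht, by omega⟩]
        have e0 : ¬ f0 < 0 := by omega
        have e1 : ¬ f1 < 0 := by omega
        simp [e0, e1]
      · rw [if_neg h1]
        rw [if_neg (by intro h; omega)]
        have e1 : f1 < 0 := by omega
        simp [e1]
    · rw [if_neg h0]
      rw [if_neg (by intro h; omega)]
      have e0 : f0 < 0 := by omega
      simp [e0]
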